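-- pv_equiv track=rewrite | github.com/huggin/gfg | bit/replace_bit.py | replaceBit
-- ===== SOURCE A (Python) =====
-- def replaceBit(N, K):
--     # code here
--     k = -1
--     for i in range(16, -1, -1):
--         if N & (1 << i):
--             k = i
--             break
--
--     if k - K + 1 >= 0:
--         N &= ~(1 << k - K + 1)
--     return N
-- ===== SOURCE B (Python) =====
-- def replaceBit(N, K):
--     # closed-form highest set bit among bits 0..16 (bit_length on the masked value)
--     k = (N & 0x1FFFF).bit_length() - 1
--     if k - K + 1 >= 0:
--         N &= ~(1 << (k - K + 1))
--     return N
-- ===== Notes on version B (the rewrite author's own statement) =====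
-- stated objective: idiomatic
-- what changed: The 17-iteration downward scan for the highest set bit in positions 0..16 is replaced by a single closed-form expression, (N & 0x1FFFF).bit_length() - 1; no loop remains.
import Mathlib
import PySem

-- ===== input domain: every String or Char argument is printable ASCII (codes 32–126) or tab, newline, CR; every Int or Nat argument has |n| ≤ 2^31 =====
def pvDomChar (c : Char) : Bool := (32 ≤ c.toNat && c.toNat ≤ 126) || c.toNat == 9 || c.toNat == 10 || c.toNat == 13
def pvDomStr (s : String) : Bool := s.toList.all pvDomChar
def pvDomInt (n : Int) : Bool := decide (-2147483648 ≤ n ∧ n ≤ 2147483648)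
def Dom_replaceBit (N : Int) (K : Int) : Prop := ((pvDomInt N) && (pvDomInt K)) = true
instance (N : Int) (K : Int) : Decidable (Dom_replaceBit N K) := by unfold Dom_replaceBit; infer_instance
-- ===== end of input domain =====

-- B replaces A's 17-step downward scan for the highest set bit among bits 0..16 by the
-- closed-form (N & 0x1FFFF).bit_length() - 1 (objective: idiomatic, no loop).

-- ===== PORT A =====
-- the for-loop 'for i in range(16, -1, -1): if N & (1 << i): k = i; break'
def replaceBitLoop (N : Int) : Nat → Int
  | 0 => if PySem.Int.band N (1 <<< (0 : Nat)) ≠ 0 then ((0 : Nat) : Int) else -1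
  | i + 1 => if PySem.Int.band N (1 <<< (i + 1 : Nat)) ≠ 0 then ((i + 1 : Nat) : Int)
             else replaceBitLoop N i

def replaceBit (N : Int) (K : Int) : Int :=
  let k := replaceBitLoop N 16
  -- 'if k - K + 1 >= 0: N &= ~(1 << k - K + 1)'; the guard makes the shift amount a Nat
  if k - K + 1 ≥ 0 then PySem.Int.band N (Int.not (1 <<< (k - K + 1).toNat)) else N

-- ===== PORT B =====
def replaceBit_alt (N : Int) (K : Int) : Int :=
  -- 'k = (N & 0x1FFFF).bit_length() - 1'
  let k : Int := (PySem.Int.bitLength (PySem.Int.band N 0x1FFFF) : Int) - 1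
  if k - K + 1 ≥ 0 then PySem.Int.band N (Int.not (1 <<< (k - K + 1).toNat)) else N

-- ===== PRECONDITION & SPEC =====
def Spec_replaceBit (N : Int) (K : Int) (out : Int) : Prop := out = replaceBit_alt N K
instance (N : Int) (K : Int) (out : Int) : Decidable (Spec_replaceBit N K out) := by unfold Spec_replaceBit; infer_instance

-- ===== CLAIM (what is proved, stated in full; the proofs are below) =====
def Claim_equal_replaceBit : Prop := ∀ (N : Int) (K : Int), Dom_replaceBit N K → Spec_replaceBit N K (replaceBit N K)

-- ===== LEMMAS AND PROOFS =====

-- Python's bit i of N (two's complement) and Python's N & (2^k - 1), as Nat-level data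
def pvBit (N : Int) (i : Nat) : Bool :=
  if 0 ≤ N then N.toNat.testBit i else !((-N - 1).toNat.testBit i)

def pvMask (N : Int) (k : Nat) : Nat :=
  if 0 ≤ N then N.toNat % 2 ^ k else (2 ^ k - 1) - (-N - 1).toNat % 2 ^ k

theorem pv_one_shift (i : Nat) : ((1 <<< i : Nat) : Int) = ((2 ^ i : Nat) : Int) := by
  rw [Nat.shiftLeft_eq, one_mul]

theorem pv_band_shift (N : Int) (i : Nat) :
    (PySem.Int.band N ((1 <<< i : Nat) : Int) ≠ 0) ↔ pvBit N i = true := by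
  rw [pv_one_shift]
  unfold pvBit
  by_cases h0 : 0 ≤ N
  · rw [PySem.Int.band_of_nonneg h0 (Int.natCast_nonneg _), Int.toNat_natCast, Nat.and_two_pow,
      if_pos h0]
    cases hb : N.toNat.testBit i
    · simp
    · simp
  · unfold PySem.Int.band
    rw [if_neg h0, if_pos (Int.natCast_nonneg _), if_neg h0, Int.toNat_natCast,
      Nat.and_comm, Nat.and_two_pow]
    cases hb : (-N - 1).toNat.testBit i
    · simp
    · simp

theorem pv_band_mask (N : Int) (k : Nat) :
    PySem.Int.band N ((2 ^ k - 1 : Nat) : Int) = ((pvMask N k : Nat) : Int) := by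
  unfold pvMask
  by_cases h0 : 0 ≤ N
  · rw [PySem.Int.band_of_nonneg h0 (Int.natCast_nonneg _), Int.toNat_natCast,
      Nat.and_two_pow_sub_one_eq_mod, if_pos h0]
  · unfold PySem.Int.band
    rw [if_neg h0, if_pos (Int.natCast_nonneg _), if_neg h0, Int.toNat_natCast,
      Nat.and_comm, Nat.and_two_pow_sub_one_eq_mod]

theorem pv_mask_lt (N : Int) (k : Nat) : pvMask N k < 2 ^ k := by
  unfold pvMask
  have hp := Nat.two_pow_pos k
  split_ifs
  · exact Nat.mod_lt _ hp
  · omega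

theorem pv_mask_succ_true (N : Int) (i : Nat) (h : pvBit N (i + 1) = true) :
    pvMask N (i + 2) = pvMask N (i + 1) + 2 ^ (i + 1) := by
  unfold pvBit at h
  unfold pvMask
  have hlt1 : N.toNat % 2 ^ (i + 1) < 2 ^ (i + 1) := Nat.mod_lt _ (Nat.two_pow_pos _)
  have hlt2 : (-N - 1).toNat % 2 ^ (i + 1) < 2 ^ (i + 1) := Nat.mod_lt _ (Nat.two_pow_pos _)
  have hp2 : (2 : Nat) ^ (i + 2) = 2 ^ (i + 1) + 2 ^ (i + 1) := by ring
  split_ifs with h0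
  · rw [if_pos h0, Nat.testBit_eq_decide_div_mod_eq, decide_eq_true_eq] at h
    rw [show (i + 2) = (i + 1) + 1 from rfl, Nat.mod_pow_succ, h, Nat.mul_one]
  · rw [if_neg h0, Nat.testBit_eq_decide_div_mod_eq, Bool.not_eq_true',
      decide_eq_false_iff_not] at h
    have hd : (-N - 1).toNat / 2 ^ (i + 1) % 2 = 0 := by omega
    rw [show (i + 2) = (i + 1) + 1 from rfl, Nat.mod_pow_succ, hd, Nat.mul_zero]
    omega

theorem pv_mask_succ_false (N : Int) (i : Nat) (h : pvBit N (i + 1) = false) :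
    pvMask N (i + 2) = pvMask N (i + 1) := by
  unfold pvBit at h
  unfold pvMask
  have hlt1 : N.toNat % 2 ^ (i + 1) < 2 ^ (i + 1) := Nat.mod_lt _ (Nat.two_pow_pos _)
  have hlt2 : (-N - 1).toNat % 2 ^ (i + 1) < 2 ^ (i + 1) := Nat.mod_lt _ (Nat.two_pow_pos _)
  have hp2 : (2 : Nat) ^ (i + 2) = 2 ^ (i + 1) + 2 ^ (i + 1) := by ring
  split_ifs with h0
  · rw [if_pos h0, Nat.testBit_eq_decide_div_mod_eq, decide_eq_false_iff_not] at h
    have hd : N.toNat / 2 ^ (i + 1) % 2 = 0 := by omega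
    rw [show (i + 2) = (i + 1) + 1 from rfl, Nat.mod_pow_succ, hd, Nat.mul_zero]
    omega
  · rw [if_neg h0, Nat.testBit_eq_decide_div_mod_eq] at h
    simp only [Bool.not_eq_eq_eq_not, Bool.not_false, decide_eq_true_eq] at h
    rw [show (i + 2) = (i + 1) + 1 from rfl, Nat.mod_pow_succ, h, Nat.mul_one]
    omega

theorem pv_mask_one_true (N : Int) (h : pvBit N 0 = true) : pvMask N 1 = 1 := by
  unfold pvBit at h
  unfold pvMask
  split_ifs with h0
  · rw [if_pos h0, Nat.testBit_zero, decide_eq_true_eq] at h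
    omega
  · rw [if_neg h0, Nat.testBit_zero, Bool.not_eq_true', decide_eq_false_iff_not] at h
    have : (-N - 1).toNat % 2 < 2 := Nat.mod_lt _ (by norm_num)
    omega

theorem pv_mask_one_false (N : Int) (h : pvBit N 0 = false) : pvMask N 1 = 0 := by
  unfold pvBit at h
  unfold pvMask
  split_ifs with h0
  · rw [if_pos h0, Nat.testBit_zero, decide_eq_false_iff_not] at h
    omega
  · rw [if_neg h0, Nat.testBit_zero] at h
    simp only [Bool.not_eq_eq_eq_not, Bool.not_false, decide_eq_true_eq] at h
    omega

theorem pv_bl_squeeze (r k : Nat) (h1 : 2 ^ k ≤ r) (h2 : r < 2 ^ (k + 1)) :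
    PySem.Int.bitLength (r : Int) = k + 1 := by
  have hne : (r : Int) ≠ 0 := by
    have : 0 < r := lt_of_lt_of_le (Nat.two_pow_pos k) h1
    exact_mod_cast this.ne'
  have hub := PySem.Int.lt_two_pow_bitLength (r : Int)
  have hlb := PySem.Int.two_pow_bitLength_le (r : Int) hne
  rw [Int.natAbs_natCast] at hub hlb
  have hk1 : k < PySem.Int.bitLength (r : Int) :=
    (Nat.pow_lt_pow_iff_right (by norm_num)).mp (lt_of_le_of_lt h1 hub)
  have hk2 : PySem.Int.bitLength (r : Int) - 1 < k + 1 :=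
    (Nat.pow_lt_pow_iff_right (by norm_num)).mp (lt_of_le_of_lt hlb h2)
  omega

theorem pv_loop_eq (i : Nat) (N : Int) :
    replaceBitLoop N i = (PySem.Int.bitLength ((pvMask N (i + 1) : Nat) : Int) : Int) - 1 := by
  induction i with
  | zero =>
    show (if PySem.Int.band N ((1 <<< (0 : Nat) : Nat) : Int) ≠ 0 then ((0 : Nat) : Int) else -1)
      = _
    cases hb : pvBit N 0 with
    | true =>
      rw [if_pos ((pv_band_shift N 0).mpr hb), pv_mask_one_true N hb,
        show PySem.Int.bitLength ((1 : Nat) : Int) = 1 by decide]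
      norm_num
    | false =>
      rw [if_neg (fun hc => by rw [(pv_band_shift N 0).mp hc] at hb; exact Bool.noConfusion hb),
        pv_mask_one_false N hb, PySem.Int.bitLength_natCast_zero]
      norm_num
  | succ i ih =>
    show (if PySem.Int.band N ((1 <<< (i + 1 : Nat) : Nat) : Int) ≠ 0 then ((i + 1 : Nat) : Int)
          else replaceBitLoop N i) = _
    cases hb : pvBit N (i + 1) with
    | true =>
      rw [if_pos ((pv_band_shift N (i + 1)).mpr hb),
        show (i + 1 + 1) = (i + 1) + 1 from rfl, pv_mask_succ_true N i hb]
      have hhi : pvMask N (i + 1) + 2 ^ (i + 1) < 2 ^ (i + 1 + 1) := by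
        have h1 := pv_mask_lt N (i + 1)
        have h2 : (2 : Nat) ^ (i + 1 + 1) = 2 ^ (i + 1) + 2 ^ (i + 1) := by ring
        omega
      rw [pv_bl_squeeze _ _ (Nat.le_add_left _ _) hhi]
      push_cast
      ring
    | false =>
      rw [if_neg (fun hc => by
            rw [(pv_band_shift N (i + 1)).mp hc] at hb; exact Bool.noConfusion hb), ih,
        show (i + 1 + 1) = (i + 1) + 1 from rfl, pv_mask_succ_false N i hb]

-- ===== VERDICT (by name: the statement is the Claim_ definition above) =====
theorem replaceBit_spec : Claim_equal_replaceBit := by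
  intro N K _
  unfold Spec_replaceBit replaceBit replaceBit_alt
  have h17 : (0x1FFFF : Int) = ((2 ^ 17 - 1 : Nat) : Int) := by norm_num
  rw [pv_loop_eq, h17, pv_band_mask]
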